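-- pv_equiv track=rewrite | github.com/JohnRushKucharski/lattice | lattice/diagram.py | find_trunk_positions
-- ===== SOURCE A (Python) =====
-- def find_all(row: str, chars: str|tuple[str,...]) -> list[int]:
--     '''
--     Find all positions of a character in a string.
--     '''
--     return [i for i, c in enumerate(row) if c in chars]
--
-- def find_trunk_positions(node_row: str, chars: str|tuple[str,...]) -> list[int]:
--     '''
--     Finds positions of trunks in a row.
--     '''
--     positions = []
--     for _, c in enumerate(chars):
--         match c:
--             case '|' | "'":
--                 positions.extend(find_all(node_row, c))
--             case '[':
--                 offset = 1
--                 locs = find_all(node_row, c)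
--                 locs = [loc + offset for loc in locs]
--                 positions.extend(locs)
--             case _:
--                 raise ValueError(f'Invalid character {c} in chars.')
--     return positions
-- ===== SOURCE B (Python) =====
-- def find_trunk_positions(node_row: str, chars: str | tuple[str, ...]) -> list[int]:
--     '''
--     Finds positions of trunks in a row.
--     '''
--     pipes, quotes, brackets = [], [], []
--     for i, c in enumerate(node_row):
--         if c == '|':
--             pipes.append(i)
--         elif c == "'":
--             quotes.append(i)
--         elif c == '[':
--             brackets.append(i + 1)
--     positions = []
--     for c in chars:
--         if c == '|':
--             positions.extend(pipes)
--         elif c == "'":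
--             positions.extend(quotes)
--         elif c == '[':
--             positions.extend(brackets)
--         else:
--             raise ValueError(f'Invalid character {c} in chars.')
--     return positions
-- ===== Notes on version B (the rewrite author's own statement) =====
-- stated objective: alternative
-- what changed: B scans node_row once, grouping pipe/quote/bracket indices (bracket offset applied during the scan) into three accumulator lists, then the chars loop only concatenates precomputed lists instead of rescanning node_row per character.
import Mathlib
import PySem

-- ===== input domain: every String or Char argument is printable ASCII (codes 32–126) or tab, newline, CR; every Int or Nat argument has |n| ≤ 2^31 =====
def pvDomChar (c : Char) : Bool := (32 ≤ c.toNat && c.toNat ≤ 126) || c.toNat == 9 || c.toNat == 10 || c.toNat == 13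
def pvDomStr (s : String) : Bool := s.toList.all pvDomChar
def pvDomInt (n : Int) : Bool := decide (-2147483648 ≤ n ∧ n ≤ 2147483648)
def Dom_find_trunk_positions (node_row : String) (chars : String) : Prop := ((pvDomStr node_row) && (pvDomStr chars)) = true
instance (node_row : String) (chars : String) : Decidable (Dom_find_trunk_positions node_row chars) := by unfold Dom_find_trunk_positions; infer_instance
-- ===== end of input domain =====

-- B replaces A's per-character rescans of node_row by a single grouping scan into three
-- accumulator lists (bracket offset applied during the scan); the chars loop then only
-- concatenates precomputed lists (alternative decomposition).

-- ===== PORT A =====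
def find_all (row : String) (chars : String) : List Int :=
  ((PySem.List.enumerate row.toList).filter (fun p => decide (p.2 ∈ chars.toList))).map (fun p => p.1)

def find_trunk_positions (node_row : String) (chars : String) : List Int :=
  (PySem.List.enumerate chars.toList).foldl
    (fun positions ic =>
      let c := ic.2
      if c = '|' ∨ c = '\'' then positions ++ find_all node_row (String.ofList [c])
      else if c = '[' then
        let offset : Int := 1
        let locs := find_all node_row (String.ofList [c])
        let locs := locs.map (fun loc => loc + offset)
        positions ++ locs
      else positions)   -- Python raises ValueError here; excluded by Pre_
    []

-- ===== PORT B =====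
def find_trunk_positions_alt (node_row : String) (chars : String) : List Int :=
  let t := (PySem.List.enumerate node_row.toList).foldl
    (fun (acc : List Int × List Int × List Int) p =>
      if p.2 = '|' then (acc.1 ++ [p.1], acc.2.1, acc.2.2)
      else if p.2 = '\'' then (acc.1, acc.2.1 ++ [p.1], acc.2.2)
      else if p.2 = '[' then (acc.1, acc.2.1, acc.2.2 ++ [p.1 + 1])
      else acc) ([], [], [])
  chars.toList.foldl (fun positions c =>
    if c = '|' then positions ++ t.1
    else if c = '\'' then positions ++ t.2.1
    else if c = '[' then positions ++ t.2.2
    else positions)   -- Python raises ValueError here; excluded by Pre_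
    []

-- ===== PRECONDITION & SPEC =====
-- Pre_ excludes exactly the inputs where chars contains a character other than | ' [ :
-- there Python A (and B) raise ValueError.
def Pre_find_trunk_positions (node_row : String) (chars : String) : Prop :=
  (chars.toList.all (fun c => c == '|' || c == '\'' || c == '[')) = true
instance (node_row : String) (chars : String) : Decidable (Pre_find_trunk_positions node_row chars) := by unfold Pre_find_trunk_positions; infer_instance

def pvWitness_find_trunk_positions : String × String := ("[|", "|")

def Spec_find_trunk_positions (node_row : String) (chars : String) (out : List Int) : Prop := out = find_trunk_positions_alt node_row chars
instance (node_row : String) (chars : String) (out : List Int) : Decidable (Spec_find_trunk_positions node_row chars out) := by unfold Spec_find_trunk_positions; infer_instance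

-- ===== CLAIM (what is proved, stated in full; the proofs are below) =====
def Claim_equal_find_trunk_positions : Prop := ∀ (node_row : String) (chars : String), Dom_find_trunk_positions node_row chars → Pre_find_trunk_positions node_row chars → Spec_find_trunk_positions node_row chars (find_trunk_positions node_row chars)

-- ===== LEMMAS AND PROOFS =====

-- the single grouping scan of B produces exactly the three filtered index lists
theorem scan_eq (ps : List (Int × Char)) (acc : List Int × List Int × List Int) :
    ps.foldl
      (fun (acc : List Int × List Int × List Int) p =>
        if p.2 = '|' then (acc.1 ++ [p.1], acc.2.1, acc.2.2)
        else if p.2 = '\'' then (acc.1, acc.2.1 ++ [p.1], acc.2.2)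
        else if p.2 = '[' then (acc.1, acc.2.1, acc.2.2 ++ [p.1 + 1])
        else acc) acc
    = (acc.1 ++ ((ps.filter (fun p => p.2 = '|')).map (fun p => p.1)),
       acc.2.1 ++ ((ps.filter (fun p => p.2 = '\'')).map (fun p => p.1)),
       acc.2.2 ++ ((ps.filter (fun p => p.2 = '[')).map (fun p => p.1 + 1))) := by
  induction ps generalizing acc with
  | nil => simp
  | cons p ps ih =>
    obtain ⟨i, c⟩ := p
    by_cases h1 : c = '|' <;> by_cases h2 : c = '\'' <;> by_cases h3 : c = '[' <;>
      simp_all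

theorem find_all_single (row : String) (s : String) (c : Char) (hs : s.toList = [c]) :
    find_all row s
      = ((PySem.List.enumerate row.toList).filter (fun p => p.2 = c)).map (fun p => p.1) := by
  unfold find_all
  congr 1
  apply List.filter_congr
  intro p _
  simp [hs]

theorem find_trunk_positions_spec' (node_row : String) (chars : String)
    (hpre : Pre_find_trunk_positions node_row chars) :
    find_trunk_positions node_row chars = find_trunk_positions_alt node_row chars := by
  unfold find_trunk_positions find_trunk_positions_alt
  rw [scan_eq]
  simp only [List.nil_append]
  -- turn B's fold over chars.toList into a fold over the enumeration
  conv_rhs =>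
    rw [show chars.toList = (PySem.List.enumerate chars.toList).map (·.2) from
          (PySem.List.map_snd_enumerate _ _).symm,
        List.foldl_map]
  apply PySem.List.foldl_congr_mem
  intro positions p hp
  have hc : p.2 ∈ chars.toList := by
    rw [← PySem.List.map_snd_enumerate chars.toList 0]
    exact List.mem_map_of_mem hp
  have hval : p.2 = '|' ∨ p.2 = '\'' ∨ p.2 = '[' := by
    have := List.all_eq_true.mp hpre p.2 hc
    simpa [or_assoc] using this
  rcases hval with h | h | h <;>
    simp [h, find_all_single node_row "|" '|' (by decide),
          find_all_single node_row "'" '\'' (by decide),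
          find_all_single node_row "[" '[' (by decide),
          List.map_map, Function.comp]

-- ===== VERDICT (by name: the statement is the Claim_ definition above) =====
theorem find_trunk_positions_spec : Claim_equal_find_trunk_positions := by
  intro node_row chars _ hpre
  exact find_trunk_positions_spec' node_row chars hpre
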